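-- pv_equiv track=rewrite | github.com/kareemadesola/pythonDataStructures | LeetCode/daily/november_23.py | getWinnerAlt
-- ===== SOURCE A (Python) =====
-- from typing import List, Optional
--
-- def getWinnerAlt(arr: List[int], k: int) -> int:
--     max_element = max(arr)
--     curr = arr[0]
--     win_streak = 0
--
--     for i in range(1, len(arr)):
--         opponent = arr[i]
--         if curr > opponent:
--             win_streak += 1
--         else:
--             curr = opponent
--             win_streak = 1
--
--         if win_streak == k or curr == max_element:
--             return curr
-- ===== SOURCE B (Python) =====
-- from typing import List, Optional
--
-- def getWinnerAlt(arr: List[int], k: int) -> int: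
--     # Run-based simulation: jump from champion to champion (the non-strict
--     # prefix maxima), scanning each champion's run of smaller challengers.
--     m = max(arr)
--     champ, rest, streak = arr[0], arr[1:], 0
--     while champ != m:
--         run = 0
--         while run < len(rest) and rest[run] < champ:
--             run += 1
--             streak += 1
--             if streak == k:
--                 return champ
--         champ, rest, streak = rest[run], rest[run + 1:], 1
--         if streak == k:
--             return champ
--     return m
-- ===== Notes on version B (the rewrite author's own statement) =====
-- stated objective: alternative
-- what changed: B simulates the tournament by jumping from champion to champion (the non-strict prefix maxima), scanning each champion's run of smaller challengers in a nested loop over the tail list, instead of A's single indexed pass with a per-element win counter.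
-- outside the precondition, e.g. on getWinnerAlt([5], 3): A returns None, B returns 5; on getWinnerAlt([], 1): A raises ValueError, B raises ValueError
import Mathlib
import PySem

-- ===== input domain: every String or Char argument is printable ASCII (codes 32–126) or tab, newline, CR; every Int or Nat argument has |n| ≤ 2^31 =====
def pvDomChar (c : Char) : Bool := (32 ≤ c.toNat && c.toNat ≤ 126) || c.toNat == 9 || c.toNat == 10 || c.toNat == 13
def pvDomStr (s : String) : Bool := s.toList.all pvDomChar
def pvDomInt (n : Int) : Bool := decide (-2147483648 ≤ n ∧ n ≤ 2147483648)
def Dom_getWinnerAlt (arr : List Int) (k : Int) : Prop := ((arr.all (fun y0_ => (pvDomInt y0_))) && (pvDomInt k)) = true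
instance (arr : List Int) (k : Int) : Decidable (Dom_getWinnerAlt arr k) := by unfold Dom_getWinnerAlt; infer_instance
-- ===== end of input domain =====

-- B replaces A's single indexed pass with a run-based champion-to-champion simulation (alternative
-- decomposition, same O(n) cost); equivalence is proved on arrays of length ≥ 2 (Pre_).

-- ===== PORT A =====
-- the for-loop over range(1, len(arr)) with state (curr, win_streak); 0 is the junk value for the
-- fall-through 'return None' path, which Pre_ excludes
def pvALoop (arr : List Int) (m k : Int) (curr streak : Int) (idxs : List Int) : Int :=
  match idxs with
  | [] => 0
  | i :: rest =>
    let opp := (PySem.List.pyGet? arr i).getD 0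
    if curr > opp then
      if streak + 1 = k ∨ curr = m then curr
      else pvALoop arr m k curr (streak + 1) rest
    else
      if (1 : Int) = k ∨ opp = m then opp
      else pvALoop arr m k opp 1 rest

def getWinnerAlt (arr : List Int) (k : Int) : Int :=
  let m := (PySem.List.max? arr (fun x => x)).getD 0
  let curr := (PySem.List.pyGet? arr 0).getD 0
  pvALoop arr m k curr 0 (PySem.List.pyRange 1 (arr.length : Int) 1)

-- ===== PORT B =====
-- inner while-loop: consume the run of challengers smaller than champ; Sum.inl = early return,
-- Sum.inr (x, xs) = the loop stopped at rest[run] = x with rest[run+1:] = xs.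
-- The [] case is where Python's rest[run] would raise IndexError — unreachable under Pre_.
def pvBRun (k champ streak : Int) (rest : List Int) : Int ⊕ (Int × List Int) :=
  match rest with
  | [] => Sum.inl 0
  | x :: xs =>
    if x < champ then
      if streak + 1 = k then Sum.inl champ
      else pvBRun k champ (streak + 1) xs
    else Sum.inr (x, xs)

theorem pvBRun_inr_length {k champ streak : Int} {rest : List Int} {x : Int} {xs : List Int}
    (h : pvBRun k champ streak rest = Sum.inr (x, xs)) : xs.length < rest.length := by
  induction rest generalizing streak with
  | nil => simp [pvBRun] at h
  | cons y ys ih =>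
    simp only [pvBRun] at h
    split at h
    · split at h
      · exact absurd h (by simp)
      · exact Nat.lt_trans (ih h) (by simp)
    · obtain ⟨rfl, rfl⟩ := by simpa using h
      simp

-- outer while-loop: champ ≠ m keeps fighting; on a new champion streak is 1 and 'if streak == k'
def pvBOuter (m k champ streak : Int) (rest : List Int) : Int :=
  if champ = m then m
  else
    match h : pvBRun k champ streak rest with
    | Sum.inl v => v
    | Sum.inr (x, xs) => if (1 : Int) = k then x else pvBOuter m k x 1 xs
termination_by rest.length
decreasing_by exact pvBRun_inr_length h

def getWinnerAlt_alt (arr : List Int) (k : Int) : Int :=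
  let m := (PySem.List.max? arr (fun x => x)).getD 0
  let champ := (PySem.List.pyGet? arr 0).getD 0
  let rest := PySem.List.slice arr (some 1) none
  pvBOuter m k champ 0 rest

-- ===== PRECONDITION & SPEC =====
-- Pre_ excludes arrays with fewer than 2 elements: max([]) raises ValueError on the empty list, and
-- on a single-element list A falls through its loop and returns None, which is not an int.
def Pre_getWinnerAlt (arr : List Int) (k : Int) : Prop := 2 ≤ arr.length
instance (arr : List Int) (k : Int) : Decidable (Pre_getWinnerAlt arr k) := by unfold Pre_getWinnerAlt; infer_instance
def pvWitness_getWinnerAlt : List Int × Int := ([1, 3, 2], 2)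

def Spec_getWinnerAlt (arr : List Int) (k : Int) (out : Int) : Prop := out = getWinnerAlt_alt arr k
instance (arr : List Int) (k : Int) (out : Int) : Decidable (Spec_getWinnerAlt arr k out) := by unfold Spec_getWinnerAlt; infer_instance

-- ===== CLAIM (what is proved, stated in full; the proofs are below) =====
def Claim_equal_getWinnerAlt : Prop := ∀ (arr : List Int) (k : Int), Dom_getWinnerAlt arr k → Pre_getWinnerAlt arr k → Spec_getWinnerAlt arr k (getWinnerAlt arr k)

-- ===== LEMMAS AND PROOFS =====

-- A's loop re-expressed over the suffix list arr[i:] instead of the index range (proof helper)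
def pvAList (m k : Int) (curr streak : Int) (rest : List Int) : Int :=
  match rest with
  | [] => 0
  | opp :: t =>
    if curr > opp then
      if streak + 1 = k ∨ curr = m then curr
      else pvAList m k curr (streak + 1) t
    else
      if (1 : Int) = k ∨ opp = m then opp
      else pvAList m k opp 1 t

-- unfolding pvBOuter one step, split by the inner loop's outcome
theorem pvBOuter_eq_inl {m k champ streak v : Int} {rest : List Int} (h : champ ≠ m)
    (hE : pvBRun k champ streak rest = Sum.inl v) : pvBOuter m k champ streak rest = v := by
  rw [pvBOuter, if_neg h]
  split
  · rename_i v' hv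
    have := hE.symm.trans hv
    simpa using this.symm
  · rename_i x xs hv
    simp [hE] at hv

theorem pvBOuter_eq_inr {m k champ streak x : Int} {rest xs : List Int} (h : champ ≠ m)
    (hE : pvBRun k champ streak rest = Sum.inr (x, xs)) :
    pvBOuter m k champ streak rest = if (1 : Int) = k then x else pvBOuter m k x 1 xs := by
  rw [pvBOuter, if_neg h]
  split
  · rename_i v' hv
    simp [hE] at hv
  · rename_i x' xs' hv
    have := hE.symm.trans hv
    simp only [Sum.inr.injEq, Prod.mk.injEq] at this
    rw [this.1, this.2]

theorem pvALoop_eq_pvAList (arr : List Int) (m k : Int) :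
    ∀ (d j : Nat) (curr streak : Int), arr.length - j = d →
      pvALoop arr m k curr streak (PySem.List.pyRange (j : Int) (arr.length : Int) 1)
        = pvAList m k curr streak (arr.drop j) := by
  intro d
  induction d with
  | zero =>
    intro j curr streak hd
    have hj : arr.length ≤ j := by omega
    rw [PySem.List.pyRange_one_eq_nil (by exact_mod_cast hj),
        List.drop_eq_nil_of_le hj]
    simp [pvALoop, pvAList]
  | succ n ih =>
    intro j curr streak hd
    have hj : j < arr.length := by omega
    rw [PySem.List.pyRange_one_cons (by exact_mod_cast hj),
        List.drop_eq_getElem_cons hj]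
    have hget : PySem.List.pyGet? arr (j : Int) = some arr[j] := by
      simp [PySem.List.pyGet?_natCast, List.getElem?_eq_getElem hj]
    have hcast : ((j : Int) + 1) = ((j + 1 : Nat) : Int) := by push_cast; ring
    simp only [pvALoop, pvAList, hget, Option.getD_some, hcast]
    split
    · split
      · rfl
      · exact ih (j + 1) curr (streak + 1) (by omega)
    · split
      · rfl
      · exact ih (j + 1) arr[j] 1 (by omega)

theorem pvAList_eq_pvBOuter (m k : Int) :
    ∀ (rest : List Int) (champ streak : Int), m ∈ rest → champ < m → (∀ y ∈ rest, y ≤ m) →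
      pvAList m k champ streak rest = pvBOuter m k champ streak rest := by
  intro rest
  induction rest with
  | nil => intro champ streak hm; exact absurd hm (by simp)
  | cons x xs ih =>
    intro champ streak hm hcm hub
    have hcne : champ ≠ m := ne_of_lt hcm
    by_cases hx : x < champ
    · -- champ wins this fight
      have hxm : x ≠ m := by
        intro h; subst h; exact absurd (lt_trans hx hcm) (lt_irrefl _)
      have hmxs : m ∈ xs := by
        rcases List.mem_cons.mp hm with h | h
        · exact absurd h.symm hxm
        · exact h
      simp only [pvAList, if_pos (by omega : champ > x)]
      by_cases hsk : streak + 1 = k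
      · have hE : pvBRun k champ streak (x :: xs) = Sum.inl champ := by
          simp [pvBRun, hx, hsk]
        rw [if_pos (Or.inl hsk), pvBOuter_eq_inl hcne hE]
      · rw [if_neg (by rintro (h | h); exact hsk h; exact hcne h)]
        have hrun : pvBRun k champ streak (x :: xs) = pvBRun k champ (streak + 1) xs := by
          simp [pvBRun, hx, hsk]
        have hstep : pvBOuter m k champ streak (x :: xs) = pvBOuter m k champ (streak + 1) xs := by
          cases hE : pvBRun k champ (streak + 1) xs with
          | inl v => rw [pvBOuter_eq_inl hcne (hrun.trans hE), pvBOuter_eq_inl hcne hE]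
          | inr p =>
            obtain ⟨y, ys⟩ := p
            rw [pvBOuter_eq_inr hcne (hrun.trans hE), pvBOuter_eq_inr hcne hE]
        rw [ih champ (streak + 1) hmxs hcm (fun y hy => hub y (List.mem_cons_of_mem _ hy)), ← hstep]
    · -- challenger x becomes champion
      have hrun : pvBRun k champ streak (x :: xs) = Sum.inr (x, xs) := by
        simp [pvBRun, if_neg hx]
      simp only [pvAList, if_neg (by omega : ¬ champ > x)]
      rw [pvBOuter_eq_inr hcne hrun]
      by_cases h1 : (1 : Int) = k
      · rw [if_pos (Or.inl h1), if_pos h1]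
      · rw [if_neg h1]
        by_cases hxm : x = m
        · rw [if_pos (Or.inr hxm)]
          rw [pvBOuter, if_pos hxm, hxm]
        · rw [if_neg (by rintro (h | h); exact h1 h; exact hxm h)]
          have hxlt : x < m := lt_of_le_of_ne (hub x (by simp)) hxm
          have hmxs : m ∈ xs := by
            rcases List.mem_cons.mp hm with h | h
            · exact absurd h.symm hxm
            · exact h
          exact ih x 1 hmxs hxlt (fun y hy => hub y (List.mem_cons_of_mem _ hy))

-- ===== VERDICT (by name: the statement is the Claim_ definition above) =====
theorem getWinnerAlt_spec : Claim_equal_getWinnerAlt := by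
  intro arr k _hdom hpre
  unfold Spec_getWinnerAlt
  obtain ⟨a, x, t, rfl⟩ : ∃ a x t, arr = a :: x :: t := by
    match arr, hpre with
    | a :: x :: t, _ => exact ⟨a, x, t, rfl⟩
  -- name the maximum
  obtain ⟨m, hmax⟩ : ∃ m, PySem.List.max? (a :: x :: t) (fun y => y) = some m :=
    Option.isSome_iff_exists.mp (by
      rw [Option.isSome_iff_ne_none, Ne, PySem.List.max?_eq_none_iff]; simp)
  have hmem : m ∈ a :: x :: t := PySem.List.max?_mem hmax
  have hub : ∀ y ∈ a :: x :: t, y ≤ m := PySem.List.max?_isMax hmax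
  unfold getWinnerAlt getWinnerAlt_alt
  simp only [hmax, Option.getD_some, PySem.List.pyGet?_zero_cons,
    PySem.List.slice_from_one, List.tail_cons]
  have hb := pvALoop_eq_pvAList (a :: x :: t) m k ((a :: x :: t).length - 1) 1 a 0 rfl
  simp only [Nat.cast_one] at hb
  rw [hb]
  simp only [List.drop_succ_cons, List.drop_zero]
  by_cases ham : a = m
  · -- A returns m at the very first fight; B returns m at once
    subst ham
    have hxa : x ≤ a := hub x (by simp)
    rw [pvBOuter, if_pos rfl]
    by_cases hax : a > x
    · simp [pvAList, if_pos hax]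
    · have hxm : x = a := le_antisymm hxa (by omega)
      simp [pvAList, hxm]
  · have ham' : a < m := lt_of_le_of_ne (hub a (by simp)) ham
    have hmxt : m ∈ x :: t := by
      rcases List.mem_cons.mp hmem with h | h
      · exact absurd h.symm ham
      · exact h
    exact pvAList_eq_pvBOuter m k (x :: t) a 0 hmxt ham'
      (fun y hy => hub y (List.mem_cons_of_mem _ hy))
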